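-- pv_equiv track=rewrite | github.com/the-omega-institute/automath | theory/2026_golden_ratio_driven_scan_projection_generation_recursive_emergence/scripts/exp_parallel_addition_kernels_weighted_primitive.py | _primitive_from_traces_polys
-- ===== SOURCE A (Python) =====
-- from typing import Dict, List, Sequence, Tuple
--
-- def _mobius(n: int) -> int:
--     if n == 1:
--         return 1
--     x = n
--     mu = 1
--     p = 2
--     while p * p <= x:
--         if x % p == 0:
--             x //= p
--             mu = -mu
--             if x % p == 0:
--                 return 0
--             while x % p == 0:
--                 x //= p
--         p += 1 if p == 2 else 2
--     if x > 1:
--         mu = -mu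
--     return mu
--
-- def _divisors(n: int) -> List[int]:
--     ds: List[int] = []
--     d = 1
--     while d * d <= n:
--         if n % d == 0:
--             ds.append(d)
--             if d * d != n:
--                 ds.append(n // d)
--         d += 1
--     return sorted(ds)
--
-- def _poly_trim(p: List[int]) -> List[int]:
--     i = len(p) - 1
--     while i > 0 and p[i] == 0:
--         i -= 1
--     return p[: i + 1]
--
-- def _poly_sub_u_pow(p: List[int], d: int) -> List[int]:
--     # p(u^d): coeff[k] goes to degree k*d.
--     if d == 1:
--         return p[:]
--     out = [0] * ((len(p) - 1) * d + 1)
--     for k, c in enumerate(p):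
--         if c:
--             out[k * d] += c
--     return _poly_trim(out)
--
-- def _poly_add_scaled(dst: List[int], src: List[int], scale: int) -> List[int]:
--     if scale == 0:
--         return dst
--     if len(dst) < len(src):
--         dst.extend([0] * (len(src) - len(dst)))
--     for i, c in enumerate(src):
--         if c:
--             dst[i] += scale * c
--     return _poly_trim(dst)
--
-- def _primitive_from_traces_polys(a: Dict[int, List[int]], n_max: int) -> Dict[int, List[int]]:
--     B: Dict[int, List[int]] = {}
--     for n in range(1, n_max + 1):
--         acc: List[int] = [0]
--         for d in _divisors(n):
--             mu = _mobius(d)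
--             if mu == 0:
--                 continue
--             m = n // d
--             poly_sub = _poly_sub_u_pow(a[m], d)
--             acc = _poly_add_scaled(acc, poly_sub, mu)
--         # divide by n
--         if any(c % n != 0 for c in acc):
--             raise RuntimeError(f"non-integer coefficients in primitive inversion at n={n}")
--         B[n] = _poly_trim([c // n for c in acc])
--     return B
-- ===== SOURCE B (Python) =====
-- from typing import Dict, List
--
--
-- def _mobius(n: int) -> int:
--     if n == 1:
--         return 1
--     x = n
--     mu = 1
--     p = 2
--     while p * p <= x:
--         if x % p == 0:
--             x //= p
--             mu = -mu
--             if x % p == 0: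
--                 return 0
--             while x % p == 0:
--                 x //= p
--         p += 1 if p == 2 else 2
--     if x > 1:
--         mu = -mu
--     return mu
--
--
-- def _divisors(n: int) -> List[int]:
--     ds: List[int] = []
--     d = 1
--     while d * d <= n:
--         if n % d == 0:
--             ds.append(d)
--             if d * d != n:
--                 ds.append(n // d)
--         d += 1
--     return sorted(ds)
--
--
-- def _poly_trim(p: List[int]) -> List[int]:
--     i = len(p) - 1
--     while i > 0 and p[i] == 0:
--         i -= 1
--     return p[: i + 1]
--
--
-- def _primitive_from_traces_polys(a: Dict[int, List[int]], n_max: int) -> Dict[int, List[int]]: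
--     # Coefficient-wise Moebius inversion: each output coefficient is computed
--     # directly as a scalar sum, instead of building/expanding/trimming
--     # intermediate polynomial lists per divisor.
--     out: Dict[int, List[int]] = {}
--     for n in range(1, n_max + 1):
--         terms = []
--         for d in _divisors(n):
--             mu = _mobius(d)
--             if mu != 0:
--                 terms.append((d, mu, a[n // d]))
--         L = 1 + max([0] + [(len(p) - 1) * d for (d, _, p) in terms])
--         coeffs: List[int] = []
--         for j in range(L):
--             s = 0
--             for (d, mu, p) in terms:
--                 if j % d == 0 and j // d < len(p):
--                     s += mu * p[j // d]
--             if s % n != 0: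
--                 raise RuntimeError(f"non-integer coefficients in primitive inversion at n={n}")
--             coeffs.append(s // n)
--         out[n] = _poly_trim(coeffs)
--     return out
-- ===== Notes on version B (the rewrite author's own statement) =====
-- stated objective: alternative
-- what changed: A accumulates whole polynomials per divisor (expand a[m](u^d), pad, add in place, trim after every step); B instead computes each output coefficient directly as a single scalar Moebius sum over the divisors, building the coefficient list once — no intermediate polynomial lists or repeated trimming.
import Mathlib
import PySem

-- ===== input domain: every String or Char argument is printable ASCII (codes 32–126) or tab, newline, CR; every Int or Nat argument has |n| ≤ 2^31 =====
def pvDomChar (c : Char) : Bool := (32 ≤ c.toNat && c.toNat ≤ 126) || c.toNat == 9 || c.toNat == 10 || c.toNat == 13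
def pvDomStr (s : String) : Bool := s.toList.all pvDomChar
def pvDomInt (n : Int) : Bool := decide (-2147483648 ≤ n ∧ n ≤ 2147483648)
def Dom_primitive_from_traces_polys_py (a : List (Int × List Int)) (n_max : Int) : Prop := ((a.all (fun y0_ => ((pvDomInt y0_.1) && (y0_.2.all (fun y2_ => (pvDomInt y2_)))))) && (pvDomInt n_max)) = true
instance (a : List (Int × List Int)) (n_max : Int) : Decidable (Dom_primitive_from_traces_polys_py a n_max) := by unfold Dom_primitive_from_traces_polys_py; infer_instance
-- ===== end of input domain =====

-- B replaces A's per-divisor polynomial accumulation (expand, pad, add-in-place, trim) by a direct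
-- per-coefficient Möbius sum; same results, objective: alternative decomposition (no speed claim).

-- ===== PORT A =====
-- Helpers _mobius/_divisors/_poly_trim appear verbatim in both Source A and Source B, so their ports are shared.

-- 'while x % p == 0: x //= p' (inner loop of _mobius). Structural fuel: each pass divides
-- x by p ≥ 2 (at the call site), so x passes are always enough; fuel never runs out there.
def stripGo : Nat → Nat → Nat → Nat
  | 0, x, _ => x
  | f + 1, x, p => if x % p = 0 then stripGo f (x / p) p else x

-- the 'while p * p <= x:' loop of _mobius (x, mu, p are the Python loop state).
-- Structural fuel: every pass increments p, and the loop runs only while p * p ≤ x ≤ x₀,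
-- so x₀ + 2 passes are always enough; the fuel-exhausted branch is never reached.
def mobiusGo : Nat → Nat → Int → Nat → Int
  | 0, x, mu, _ => if 1 < x then -mu else mu
  | f + 1, x, mu, p =>
    if p * p ≤ x then
      if x % p = 0 then
        let x1 := x / p
        if x1 % p = 0 then 0
        else mobiusGo f (stripGo x1 x1 p) (-mu) (if p = 2 then 3 else p + 2)
      else mobiusGo f x mu (if p = 2 then 3 else p + 2)
    else if 1 < x then -mu else mu

-- _mobius; it is applied only to divisor values d ≥ 1, where Int.toNat is exact
-- (for n ≤ 0 both _mobius and this port return 1 as well)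
def mobius (n : Int) : Int := if n = 1 then 1 else mobiusGo (n.toNat + 2) n.toNat 1 2

-- the 'while d * d <= n:' collection loop of _divisors. Structural fuel: every pass
-- increments d, and the loop runs only while d * d ≤ n (so d ≤ n); n + 1 passes suffice.
def divisorsGo : Nat → Nat → Nat → List Int → List Int
  | 0, _, _, ds => ds
  | f + 1, n, d, ds =>
    if d * d ≤ n then
      divisorsGo f n (d + 1)
        (if n % d = 0 then
          (if d * d ≠ n then (ds ++ [(d : Int)]) ++ [((n / d : Nat) : Int)] else ds ++ [(d : Int)])
         else ds)
    else ds

-- _divisors; every call site passes n ≥ 1, where Int.toNat is exact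
def divisors (n : Int) : List Int :=
  PySem.List.sorted (divisorsGo (n.toNat + 1) n.toNat 1 []) (fun x => x) false

-- the 'while i > 0 and p[i] == 0: i -= 1' loop of _poly_trim (p[i] with 0 ≤ i < len(p) is getD)
def trimIdx (p : List Int) : Nat → Nat
  | 0 => 0
  | i + 1 => if p.getD (i + 1) 0 = 0 then trimIdx p i else i + 1

-- _poly_trim; 'p[: i + 1]' with i + 1 ≥ 0 is take
def polyTrim (p : List Int) : List Int := p.take (trimIdx p (p.length - 1) + 1)

-- _poly_sub_u_pow; '[0] * k' is empty for k ≤ 0, as List.replicate of toNat is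
def polySubUPow (p : List Int) (d : Int) : List Int :=
  if d = 1 then p
  else
    let out0 : List Int := List.replicate (((p.length : Int) - 1) * d + 1).toNat 0
    let out := (PySem.List.enumerate p).foldl
      (fun o kc =>
        if kc.2 ≠ 0 then PySem.List.pySetD o (kc.1 * d) (PySem.List.pyGetD o (kc.1 * d) 0 + kc.2) else o)
      out0
    polyTrim out

-- _poly_add_scaled ('dst.extend([0] * k)' is appending replicate; 'dst[i] += scale * c' via pySetD/pyGetD)
def polyAddScaled (dst src : List Int) (scale : Int) : List Int :=
  if scale = 0 then dst
  else
    let dst1 := if dst.length < src.length then dst ++ List.replicate (src.length - dst.length) 0 else dst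
    let dst2 := (PySem.List.enumerate src).foldl
      (fun o kc =>
        if kc.2 ≠ 0 then PySem.List.pySetD o kc.1 (PySem.List.pyGetD o kc.1 0 + scale * kc.2) else o)
      dst1
    polyTrim dst2

-- a[m]; the KeyError case is excluded by Pre_
def getPoly (a : List (Int × List Int)) (m : Int) : List Int := ((PySem.Dict.mk a).get? m).getD []

-- _primitive_from_traces_polys (the 'any(c % n != 0): raise' inputs are excluded by Pre_)
def primitive_from_traces_polys_py (a : List (Int × List Int)) (n_max : Int) : List (Int × List Int) :=
  ((PySem.List.pyRange 1 (n_max + 1) 1).foldl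
    (fun (B : PySem.Dict Int (List Int)) n =>
      let acc := (divisors n).foldl
        (fun acc d =>
          let mu := mobius d
          if mu = 0 then acc
          else polyAddScaled acc (polySubUPow (getPoly a (PySem.Int.floordiv n d)) d) mu)
        [0]
      B.insert n (polyTrim (acc.map (fun c => PySem.Int.floordiv c n))))
    PySem.Dict.empty).items

-- ===== PORT B =====
-- Source B: per-coefficient Möbius sums ('p[j // d]' with its guard is pyGetD; the raise is excluded by Pre_)
def primitive_from_traces_polys_py_alt (a : List (Int × List Int)) (n_max : Int) : List (Int × List Int) :=
  ((PySem.List.pyRange 1 (n_max + 1) 1).foldl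
    (fun (out : PySem.Dict Int (List Int)) n =>
      let terms := (divisors n).foldl
        (fun t d =>
          let mu := mobius d
          if mu ≠ 0 then t ++ [(d, mu, getPoly a (PySem.Int.floordiv n d))] else t)
        ([] : List (Int × Int × List Int))
      let L : Int := 1 + (terms.map (fun t => ((t.2.2.length : Int) - 1) * t.1)).foldl max 0
      let coeffs := (PySem.List.pyRange 0 L 1).map (fun j =>
        let s := terms.foldl
          (fun s t =>
            if PySem.Int.mod j t.1 = 0 ∧ PySem.Int.floordiv j t.1 < (t.2.2.length : Int)
            then s + t.2.1 * PySem.List.pyGetD t.2.2 (PySem.Int.floordiv j t.1) 0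
            else s)
          0
        PySem.Int.floordiv s n)
      out.insert n (polyTrim coeffs))
    PySem.Dict.empty).items

-- ===== PRECONDITION & SPEC =====
-- the d-th Möbius-inversion summand of coefficient j at level n
def primTerm (a : List (Int × List Int)) (n d j : Int) : Int :=
  if PySem.Int.mod j d = 0
  then mobius d * (getPoly a (PySem.Int.floordiv n d)).getD (PySem.Int.floordiv j d).toNat 0
  else 0

def primSum (a : List (Int × List Int)) (n j : Int) : Int :=
  ((divisors n).map (fun d => primTerm a n d j)).sum

-- 1 + the largest degree contributing to level n (coefficients vanish from here on)
def degBound (a : List (Int × List Int)) (n : Int) : Int :=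
  1 + (((divisors n).filter (fun d => decide (mobius d ≠ 0))).map
        (fun d => (((getPoly a (PySem.Int.floordiv n d)).length : Int) - 1) * d)).foldl max 0

-- Pre_: exactly the inputs on which A returns: every level 1..n_max is a key of a (else KeyError)
-- and every Möbius-inverted coefficient is divisible by its level n (else RuntimeError).
-- (the first conjunct is implied by the key conjunct; it only lets deciding fail fast for huge n_max)
def Pre_primitive_from_traces_polys_py (a : List (Int × List Int)) (n_max : Int) : Prop :=
  n_max ≤ (a.length : Int) ∧
  ∀ n ∈ PySem.List.pyRange 1 (n_max + 1) 1,
    ((PySem.Dict.mk a).get? n).isSome = true ∧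
    ∀ j ∈ PySem.List.pyRange 0 (degBound a n) 1, PySem.Int.mod (primSum a n j) n = 0
instance (a : List (Int × List Int)) (n_max : Int) : Decidable (Pre_primitive_from_traces_polys_py a n_max) := by
  unfold Pre_primitive_from_traces_polys_py; infer_instance

def pvWitness_primitive_from_traces_polys_py : (List (Int × List Int)) × Int :=
  ([(1, [0, 1]), (2, [0, 0, 1])], 2)

def Spec_primitive_from_traces_polys_py (a : List (Int × List Int)) (n_max : Int) (out : List (Int × List Int)) : Prop := out = primitive_from_traces_polys_py_alt a n_max
instance (a : List (Int × List Int)) (n_max : Int) (out : List (Int × List Int)) : Decidable (Spec_primitive_from_traces_polys_py a n_max out) := by unfold Spec_primitive_from_traces_polys_py; infer_instance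

-- ===== CLAIM (what is proved, stated in full; the proofs are below) =====
def Claim_equal_primitive_from_traces_polys_py : Prop := ∀ (a : List (Int × List Int)) (n_max : Int), Dom_primitive_from_traces_polys_py a n_max → Pre_primitive_from_traces_polys_py a n_max → Spec_primitive_from_traces_polys_py a n_max (primitive_from_traces_polys_py a n_max)

-- ===== LEMMAS AND PROOFS =====

-- ---- trim ----
lemma trimIdx_le (p : List Int) (i : Nat) : trimIdx p i ≤ i := by
  induction i with
  | zero => exact le_refl _
  | succ i ih =>
      rw [trimIdx]
      split
      · omega
      · exact le_refl _

lemma trimIdx_zero_above (p : List Int) (i : Nat) : ∀ k : Nat, trimIdx p i < k → k ≤ i →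
    p.getD k 0 = 0 := by
  induction i with
  | zero => intro k h1 h2; omega
  | succ i ih =>
      intro k h1 h2
      rw [trimIdx] at h1
      split at h1
      · rcases Nat.lt_or_ge k (i + 1) with hk | hk
        · exact ih k h1 (by omega)
        · have hk2 : k = i + 1 := by omega
          rw [hk2]
          assumption
      · omega

lemma coeff_polyTrim (p : List Int) (j : Nat) : (polyTrim p).getD j 0 = p.getD j 0 := by
  unfold polyTrim
  set t := trimIdx p (p.length - 1) with ht
  rcases Nat.lt_or_ge j (t + 1) with hj | hj
  · simp [List.getD_eq_getElem?_getD, List.getElem?_take, hj]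
  · have h1 : (p.take (t + 1)).getD j 0 = 0 := by
      simp [List.getD_eq_getElem?_getD, List.getElem?_take, Nat.not_lt.mpr hj]
    rw [h1]
    rcases Nat.lt_or_ge j p.length with hjl | hjl
    · exact (trimIdx_zero_above p (p.length - 1) j (by omega) (by omega)).symm
    · exact (List.getD_eq_default p 0 hjl).symm

lemma polyTrim_ne_nil (p : List Int) (h : p ≠ []) : polyTrim p ≠ [] := by
  have hl : 0 < p.length := List.length_pos_of_ne_nil h
  apply List.ne_nil_of_length_pos
  simp only [polyTrim, List.length_take]
  omega

lemma trimIdx_nonzero (p : List Int) (i : Nat) : 0 < trimIdx p i →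
    p.getD (trimIdx p i) 0 ≠ 0 := by
  induction i with
  | zero => intro h0; simp [trimIdx] at h0
  | succ i ih =>
      rw [trimIdx]
      split
      · exact ih
      · intro _; assumption

lemma polyTrim_congr (p q : List Int) (hp : p ≠ []) (hq : q ≠ [])
    (h : ∀ j : Nat, p.getD j 0 = q.getD j 0) : polyTrim p = polyTrim q := by
  have hpl : 0 < p.length := List.length_pos_of_ne_nil hp
  have hql : 0 < q.length := List.length_pos_of_ne_nil hq
  set tp := trimIdx p (p.length - 1) with htp
  set tq := trimIdx q (q.length - 1) with htq
  have htpl : tp ≤ p.length - 1 := trimIdx_le p _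
  have htql : tq ≤ q.length - 1 := trimIdx_le q _
  have hpz : ∀ k : Nat, tp < k → p.getD k 0 = 0 := by
    intro k hk
    rcases Nat.lt_or_ge k p.length with hkl | hkl
    · exact trimIdx_zero_above p (p.length - 1) k hk (by omega)
    · exact List.getD_eq_default p 0 hkl
  have hqz : ∀ k : Nat, tq < k → q.getD k 0 = 0 := by
    intro k hk
    rcases Nat.lt_or_ge k q.length with hkl | hkl
    · exact trimIdx_zero_above q (q.length - 1) k hk (by omega)
    · exact List.getD_eq_default q 0 hkl
  have h1 : tp ≤ tq := by
    rcases Nat.eq_zero_or_pos tp with h0 | h0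
    · omega
    · by_contra hgt
      exact (trimIdx_nonzero p _ h0) (by rw [h]; exact hqz tp (by omega))
  have h2 : tq ≤ tp := by
    rcases Nat.eq_zero_or_pos tq with h0 | h0
    · omega
    · by_contra hgt
      exact (trimIdx_nonzero q _ h0) (by rw [← h]; exact hpz tq (by omega))
  have hte : tp = tq := le_antisymm h1 h2
  unfold polyTrim
  rw [← htp, ← htq, ← hte]
  apply List.ext_getElem
  · simp only [List.length_take]; omega
  · intro i hi1 hi2
    simp only [List.getElem_take]
    have hip : i < p.length := by simp [List.length_take] at hi1; omega
    have hiq : i < q.length := by simp [List.length_take] at hi2; omega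
    have := h i
    rwa [List.getD_eq_getElem p 0 hip, List.getD_eq_getElem q 0 hiq] at this

-- ---- scatter folds ----
lemma enumerate_eq {α : Type} (p : List α) (d : α) (s : Int) :
    PySem.List.enumerate p s = (List.range p.length).map (fun k : Nat => (s + (k : Int), p.getD k d)) := by
  induction p generalizing s with
  | nil => simp [PySem.List.enumerate_nil]
  | cons x xs ih =>
      rw [PySem.List.enumerate_cons, ih (s + 1)]
      simp only [List.length_cons, List.range_succ_eq_map, List.map_cons, List.map_map]
      refine congrArg₂ List.cons (by simp) ?_
      apply List.map_congr_left
      intro k _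
      simp only [Function.comp_apply, List.getD_cons_succ]
      refine congrArg₂ Prod.mk ?_ rfl
      push_cast; ring

lemma scatter_getD (ι : Nat → Nat) (hι : Function.Injective ι) (g h : Nat → Int)
    (hgh : ∀ k, h k = 0 → g k = 0) :
    ∀ (K : List Nat), K.Nodup → ∀ (o : List Int), (∀ k ∈ K, ι k < o.length) → ∀ (j : Nat),
    (K.foldl (fun o k => if h k ≠ 0 then o.set (ι k) (o.getD (ι k) 0 + g k) else o) o).getD j 0
      = o.getD j 0 + ((K.filter (fun k => decide (ι k = j))).map g).sum := by
  intro K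
  induction K with
  | nil => simp
  | cons k K ih =>
      intro hK o hlen j
      have hKn : K.Nodup := hK.of_cons
      have hkK : k ∉ K := by
        have := List.nodup_cons.mp hK; exact this.1
      have hlenK : ∀ k' ∈ K, ι k' < o.length := fun k' hk' => hlen k' (List.mem_cons_of_mem _ hk')
      simp only [List.foldl_cons, List.filter_cons]
      by_cases hk0 : h k = 0
      · rw [if_neg (by simpa using hk0)]
        rw [ih hKn o hlenK j]
        by_cases hj : ι k = j
        · simp only [hj, decide_true, if_pos, List.map_cons, List.sum_cons, hgh k hk0]
          ring
        · simp [hj]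
      · rw [if_pos (by simpa using hk0)]
        set o' := o.set (ι k) (o.getD (ι k) 0 + g k) with ho'
        have hlen' : ∀ k' ∈ K, ι k' < o'.length := by
          intro k' hk'
          rw [ho', List.length_set]
          exact hlenK k' hk'
        rw [ih hKn o' hlen' j]
        by_cases hj : ι k = j
        · have hje : o'.getD j 0 = o.getD j 0 + g k := by
            rw [ho', ← hj, List.getD_eq_getElem?_getD, List.getElem?_set, if_pos rfl,
              if_pos (hlen k (List.mem_cons_self ..)), List.getD_eq_getElem?_getD]
            rfl
          have hfe : K.filter (fun k' => decide (ι k' = j)) = [] := by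
            rw [List.filter_eq_nil_iff]
            intro k' hk'
            simp only [decide_eq_true_eq]
            intro hc
            exact hkK (by rwa [hι (hc.trans hj.symm)] at hk')
          rw [hje, hfe, hj]
          simp
        · have hje : o'.getD j 0 = o.getD j 0 := by
            rw [ho', List.getD_eq_getElem?_getD, List.getElem?_set, if_neg hj,
              ← List.getD_eq_getElem?_getD]
          rw [hje]
          simp [hj]

lemma filter_range_mul (e L j : Nat) (he : 0 < e) :
    (List.range L).filter (fun k => decide (k * e = j))
      = if j % e = 0 ∧ j / e < L then [j / e] else [] := by
  induction L with
  | zero => simp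
  | succ L ih =>
      rw [List.range_succ, List.filter_append, ih]
      by_cases hL : L * e = j
      · have hm : j % e = 0 := by rw [← hL]; exact Nat.mul_mod_left L e
        have hd : j / e = L := by rw [← hL]; exact Nat.mul_div_cancel L he
        rw [if_neg (by omega), if_pos (by omega)]
        simp [hL, hd]
      · have hne : ¬(j % e = 0 ∧ j / e = L) := by
          rintro ⟨h1, h2⟩
          exact hL (by rw [← h2, Nat.div_mul_cancel (Nat.dvd_of_mod_eq_zero h1)])
        have hiff : (j % e = 0 ∧ j / e < L) ↔ (j % e = 0 ∧ j / e < L + 1) := by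
          constructor <;> rintro ⟨h1, h2⟩ <;> exact ⟨h1, by by_cases hc : j / e = L <;> [exact absurd ⟨h1, hc⟩ hne; omega]⟩
        simp only [List.filter_cons, List.filter_nil, decide_eq_true_eq, hL, if_neg hL]
        split
        · rename_i hcond
          rw [if_pos (hiff.mp hcond)]
          simp
        · rename_i hcond
          rw [if_neg (fun hc => hcond (hiff.mpr hc))]
          simp

lemma filter_range_id (L j : Nat) :
    (List.range L).filter (fun k => decide (k = j)) = if j < L then [j] else [] := by
  induction L with
  | zero => simp
  | succ L ih =>
      rw [List.range_succ, List.filter_append, ih]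
      by_cases hL : L = j
      · subst hL
        rw [if_neg (by omega), if_pos (by omega)]
        simp
      · simp only [List.filter_cons, List.filter_nil, decide_eq_true_eq, if_neg hL]
        by_cases hj : j < L
        · rw [if_pos hj, if_pos (by omega)]; simp
        · rw [if_neg hj, if_neg (by omega)]; simp

-- ---- coefficient views of A's polynomial primitives ----
lemma getD_replicate_zero (m j : Nat) : (List.replicate m (0:Int)).getD j 0 = 0 := by
  rw [List.getD_eq_getElem?_getD, List.getElem?_replicate]
  split <;> rfl

lemma coeff_polySubUPow (p : List Int) (d : Int) (hd : 1 ≤ d) (j : Nat) :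
    (polySubUPow p d).getD j 0
      = if j % d.toNat = 0 ∧ j / d.toNat < p.length then p.getD (j / d.toNat) 0 else 0 := by
  set e := d.toNat with hedef
  have he1 : 1 ≤ e := by omega
  have hde : d = (e : Int) := by omega
  unfold polySubUPow
  by_cases hd1 : d = 1
  · rw [if_pos hd1]
    have he' : e = 1 := by omega
    rw [he']
    simp only [Nat.mod_one, Nat.div_one, true_and]
    rcases Nat.lt_or_ge j p.length with hjl | hjl
    · rw [if_pos hjl]
    · rw [if_neg (by omega), List.getD_eq_default p 0 hjl]
  · rw [if_neg hd1]
    simp only []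
    rw [coeff_polyTrim, enumerate_eq p 0 0, List.foldl_map]
    rw [PySem.List.foldl_congr_mem _ _
      (fun o (k : Nat) => if p.getD k 0 ≠ 0 then o.set (k * e) (o.getD (k * e) 0 + p.getD k 0) else o) _
      (by
        intro o k _
        simp only [zero_add]
        rw [hde, ← Nat.cast_mul, PySem.List.pySetD_natCast, PySem.List.pyGetD_natCast])]
    have hinj : Function.Injective (fun k : Nat => k * e) := by
      intro x y hxy
      simp only [] at hxy
      exact Nat.eq_of_mul_eq_mul_right (by omega) hxy
    rcases Nat.eq_zero_or_pos p.length with hlen0 | hlenpos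
    · rw [hlen0]
      simp only [List.range_zero, List.foldl_nil]
      rw [getD_replicate_zero, if_neg (fun hc => Nat.not_lt_zero _ hc.2)]
    · have h1 : ((p.length : Int) - 1) = ((p.length - 1 : Nat) : Int) := by omega
      have h2 : ((p.length - 1 : Nat) : Int) * ((e : Nat) : Int) + 1
          = (((p.length - 1) * e + 1 : Nat) : Int) := by push_cast; ring
      have hlen' : (((p.length : Int) - 1) * d + 1).toNat = (p.length - 1) * e + 1 := by
        rw [hde, h1, h2, Int.toNat_natCast]
      have hcond : ∀ k ∈ List.range p.length,
          (fun k : Nat => k * e) k < (List.replicate ((((p.length : Int) - 1) * d + 1).toNat) (0:Int)).length := by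
        intro k hk
        have hk' : k < p.length := List.mem_range.mp hk
        simp only [List.length_replicate, hlen']
        have : k * e ≤ (p.length - 1) * e := Nat.mul_le_mul_right e (by omega)
        omega
      have hsc := scatter_getD (fun k : Nat => k * e) hinj
        (fun k => p.getD k 0) (fun k => p.getD k 0) (fun _ hk => hk)
        (List.range p.length) (List.nodup_range)
        (List.replicate ((((p.length : Int) - 1) * d + 1).toNat) (0:Int)) hcond j
      simp only [] at hsc
      rw [hsc, getD_replicate_zero, filter_range_mul e p.length j (by omega)]
      split
      · simp
      · simp

lemma getD_append_replicate_zero (l : List Int) (m j : Nat) :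
    (l ++ List.replicate m (0:Int)).getD j 0 = l.getD j 0 := by
  rcases Nat.lt_or_ge j l.length with h | h
  · rw [List.getD_eq_getElem?_getD, List.getElem?_append_left h, ← List.getD_eq_getElem?_getD]
  · rw [List.getD_eq_default l 0 h, List.getD_eq_getElem?_getD, List.getElem?_append_right h,
      List.getElem?_replicate]
    split <;> rfl

lemma coeff_polyAddScaled (dst src : List Int) (s : Int) (j : Nat) :
    (polyAddScaled dst src s).getD j 0 = dst.getD j 0 + s * src.getD j 0 := by
  by_cases hs : s = 0
  · unfold polyAddScaled
    rw [if_pos hs, hs]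
    simp
  · unfold polyAddScaled
    rw [if_neg hs]
    simp only []
    rw [coeff_polyTrim, enumerate_eq src 0 0, List.foldl_map]
    rw [PySem.List.foldl_congr_mem _ _
      (fun o (k : Nat) => if src.getD k 0 ≠ 0 then o.set k (o.getD k 0 + s * src.getD k 0) else o) _
      (by
        intro o k _
        simp only [zero_add]
        rw [PySem.List.pySetD_natCast, PySem.List.pyGetD_natCast])]
    set dst1 := if dst.length < src.length then dst ++ List.replicate (src.length - dst.length) 0 else dst with hdst1
    have hlen1' : src.length ≤ dst1.length := by
      rw [hdst1]
      split
      · simp only [List.length_append, List.length_replicate]; omega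
      · omega
    have hgd1 : ∀ k : Nat, dst1.getD k 0 = dst.getD k 0 := by
      intro k
      rw [hdst1]
      split
      · exact getD_append_replicate_zero dst _ k
      · rfl
    have hcond : ∀ k ∈ List.range src.length, (fun k : Nat => k) k < dst1.length := by
      intro k hk
      have := List.mem_range.mp hk
      simp only []
      omega
    have hsc := scatter_getD (fun k : Nat => k) (fun a b h => h)
      (fun k => s * src.getD k 0) (fun k => src.getD k 0) (fun k hk => by simp only [] at hk ⊢; rw [hk, mul_zero])
      (List.range src.length) (List.nodup_range) dst1 hcond j
    simp only [] at hsc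
    rw [hsc, filter_range_id src.length j, hgd1]
    split
    · simp
    · rename_i hj
      rw [List.getD_eq_default src 0 (by omega)]
      simp

lemma length_addScaled_fold (scale : Int) (l : List (Int × Int)) (o : List Int) :
    (l.foldl
      (fun o kc =>
        if kc.2 ≠ 0 then PySem.List.pySetD o kc.1 (PySem.List.pyGetD o kc.1 0 + scale * kc.2) else o)
      o).length = o.length := by
  induction l generalizing o with
  | nil => rfl
  | cons kc l ih =>
      simp only [List.foldl_cons]
      split
      · rw [ih, PySem.List.length_pySetD]
      · exact ih o

lemma polyAddScaled_ne_nil (dst src : List Int) (s : Int) (h : dst ≠ []) :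
    polyAddScaled dst src s ≠ [] := by
  have hl : 0 < dst.length := List.length_pos_of_ne_nil h
  unfold polyAddScaled
  split
  · exact h
  · simp only []
    apply polyTrim_ne_nil
    apply List.ne_nil_of_length_pos
    rw [length_addScaled_fold]
    split
    · simp only [List.length_append, List.length_replicate]; omega
    · omega

-- ---- divisors are ≥ 1 ----
lemma divisorsGo_ge_one : ∀ (f n dd : Nat) (ds : List Int), 1 ≤ dd → (∀ x ∈ ds, 1 ≤ x) →
    ∀ x ∈ divisorsGo f n dd ds, 1 ≤ x := by
  intro f
  induction f with
  | zero => intro n dd ds _ hds x hx; exact hds x hx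
  | succ f ih =>
      intro n d ds hd hds x hx
      rw [divisorsGo] at hx
      split at hx
      · rename_i h
        refine ih n (d + 1) _ (by omega) ?_ x hx
        intro y hy
        have hd1 : (1 : Int) ≤ (d : Int) := by exact_mod_cast hd
        have hdn : d ≤ n := le_trans (Nat.le_mul_of_pos_left d (by omega)) h
        have hnd1 : (1 : Int) ≤ ((n / d : Nat) : Int) := by
          have : 1 ≤ n / d := (Nat.one_le_div_iff (by omega)).mpr hdn
          exact_mod_cast this
        split_ifs at hy
        · rcases List.mem_append.mp hy with hy | hy
          · rcases List.mem_append.mp hy with hy | hy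
            · exact hds y hy
            · rw [List.mem_singleton.mp hy]; exact hd1
          · rw [List.mem_singleton.mp hy]; exact hnd1
        · rcases List.mem_append.mp hy with hy | hy
          · exact hds y hy
          · rw [List.mem_singleton.mp hy]; exact hd1
        · exact hds y hy
      · exact hds x hx

lemma one_le_of_mem_divisors (n d : Int) (hn : 1 ≤ n) (h : d ∈ divisors n) : 1 ≤ d := by
  unfold divisors at h
  have h' := (PySem.List.mem_sorted _ _ _ d).mp h
  exact divisorsGo_ge_one (n.toNat + 1) n.toNat 1 [] (by omega) (by simp) d h'

-- ---- A's accumulator, coefficientwise ----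
lemma accA_spec (a : List (Int × List Int)) (n : Int) (l : List Int) (hl : ∀ d ∈ l, 1 ≤ d) :
    ∀ (acc0 : List Int), acc0 ≠ [] →
    (l.foldl
        (fun acc d =>
          let mu := mobius d
          if mu = 0 then acc
          else polyAddScaled acc (polySubUPow (getPoly a (PySem.Int.floordiv n d)) d) mu)
        acc0 ≠ []) ∧
    ∀ j : Nat,
      (l.foldl
        (fun acc d =>
          let mu := mobius d
          if mu = 0 then acc
          else polyAddScaled acc (polySubUPow (getPoly a (PySem.Int.floordiv n d)) d) mu)
        acc0).getD j 0
      = acc0.getD j 0 + (l.map (fun d => primTerm a n d (j : Int))).sum := by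
  induction l with
  | nil => intro acc0 h0; exact ⟨h0, fun j => by simp⟩
  | cons dd l ih =>
      intro acc0 h0
      have hdd : 1 ≤ dd := hl dd (List.mem_cons_self ..)
      have hl' : ∀ d ∈ l, 1 ≤ d := fun d hd => hl d (List.mem_cons_of_mem _ hd)
      have ihx := fun acc1 h1 => ih hl' acc1 h1
      simp only [List.foldl_cons, List.map_cons, List.sum_cons]
      by_cases hmu : mobius dd = 0
      · simp only [hmu, if_pos, ite_true]
        obtain ⟨ih1, ih2⟩ := ihx acc0 h0
        refine ⟨by simpa [hmu] using ih1, fun j => ?_⟩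
        have hterm : primTerm a n dd (j : Int) = 0 := by
          unfold primTerm
          rw [hmu]
          split <;> simp
        rw [hterm]
        have := ih2 j
        simp only [hmu, ite_true] at this ⊢
        rw [this]
        ring
      · simp only [hmu, ite_false]
        set acc1 := polyAddScaled acc0 (polySubUPow (getPoly a (PySem.Int.floordiv n dd)) dd) (mobius dd) with hacc1
        have h1 : acc1 ≠ [] := polyAddScaled_ne_nil _ _ _ h0
        obtain ⟨ih1, ih2⟩ := ihx acc1 h1
        refine ⟨by simpa [hmu] using ih1, fun j => ?_⟩
        have := ih2 j
        simp only [hmu, ite_false] at this ⊢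
        rw [this, hacc1, coeff_polyAddScaled,
          coeff_polySubUPow (getPoly a (PySem.Int.floordiv n dd)) dd hdd j]
        have hterm : mobius dd *
            (if j % dd.toNat = 0 ∧ j / dd.toNat < (getPoly a (PySem.Int.floordiv n dd)).length
             then (getPoly a (PySem.Int.floordiv n dd)).getD (j / dd.toNat) 0 else 0)
            = primTerm a n dd (j : Int) := by
          unfold primTerm
          have hde : dd = ((dd.toNat : Nat) : Int) := by omega
          rw [hde, PySem.Int.mod_natCast, PySem.Int.floordiv_natCast]
          simp only [Int.toNat_natCast]
          by_cases hm : j % dd.toNat = 0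
          · by_cases hlt : j / dd.toNat < (getPoly a (PySem.Int.floordiv n ((dd.toNat : Nat) : Int))).length
            · rw [if_pos ⟨hm, hlt⟩, if_pos (by exact_mod_cast congrArg (Nat.cast : Nat → Int) hm)]
            · rw [if_neg (fun hc => hlt hc.2), if_pos (by exact_mod_cast congrArg (Nat.cast : Nat → Int) hm),
                List.getD_eq_default _ 0 (by omega), mul_zero]
          · rw [if_neg (fun hc => hm hc.1), if_neg (by exact_mod_cast fun hc => hm (by exact_mod_cast hc)), mul_zero]
        rw [hterm]
        ring

-- ---- B's terms and inner sum ----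
lemma termsB_eq (a : List (Int × List Int)) (n : Int) :
    (divisors n).foldl
        (fun t d =>
          let mu := mobius d
          if mu ≠ 0 then t ++ [(d, mu, getPoly a (PySem.Int.floordiv n d))] else t)
        ([] : List (Int × Int × List Int))
      = ((divisors n).filter (fun d => decide (mobius d ≠ 0))).map
          (fun d => (d, mobius d, getPoly a (PySem.Int.floordiv n d))) := by
  have := PySem.List.foldl_append_ite (fun d => mobius d ≠ 0)
    (fun d => (d, mobius d, getPoly a (PySem.Int.floordiv n d))) (divisors n)
    ([] : List (Int × Int × List Int))
  simpa using this

lemma floordiv_zero_left (n : Int) : PySem.Int.floordiv 0 n = 0 := by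
  unfold PySem.Int.floordiv
  simp [Int.zero_fdiv]

lemma sum_map_filter_of_zero (l : List Int) (q : Int → Bool) (g : Int → Int)
    (h : ∀ d ∈ l, q d = false → g d = 0) : ((l.filter q).map g).sum = (l.map g).sum := by
  induction l with
  | nil => rfl
  | cons d l ih =>
      have h' : ∀ d' ∈ l, q d' = false → g d' = 0 :=
        fun d' hd' => h d' (List.mem_cons_of_mem _ hd')
      rw [List.filter_cons]
      by_cases hq : q d
      · rw [if_pos hq]
        simp only [List.map_cons, List.sum_cons]
        rw [ih h']
      · rw [if_neg hq]
        simp only [List.map_cons, List.sum_cons]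
        rw [ih h', h d (List.mem_cons_self ..) (by simpa using hq), zero_add]

lemma sumB_spec (a : List (Int × List Int)) (n j : Int) (hn : 1 ≤ n) (hj : 0 ≤ j) :
    (((divisors n).filter (fun d => decide (mobius d ≠ 0))).map
        (fun d => (d, mobius d, getPoly a (PySem.Int.floordiv n d)))).foldl
      (fun s t =>
        if PySem.Int.mod j t.1 = 0 ∧ PySem.Int.floordiv j t.1 < (t.2.2.length : Int)
        then s + t.2.1 * PySem.List.pyGetD t.2.2 (PySem.Int.floordiv j t.1) 0
        else s)
      0 = primSum a n j := by
  rw [List.foldl_map]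
  rw [PySem.List.foldl_congr_mem _ _ (fun s d => s + primTerm a n d j) _ (by
    intro s d hd
    have hd1 : 1 ≤ d := one_le_of_mem_divisors n d hn (List.mem_of_mem_filter hd)
    simp only []
    unfold primTerm
    by_cases hm : PySem.Int.mod j d = 0
    · by_cases hlt : PySem.Int.floordiv j d < ((getPoly a (PySem.Int.floordiv n d)).length : Int)
      · rw [if_pos ⟨hm, hlt⟩, if_pos hm]
        have hj0 : 0 ≤ PySem.Int.floordiv j d := by
          rw [PySem.Int.floordiv_eq_ediv_of_pos (by omega)]
          exact Int.ediv_nonneg hj (by omega)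
        rw [PySem.List.pyGetD_eq_getElem _ 0 hj0 hlt,
          List.getD_eq_getElem _ 0 (by omega)]
      · rw [if_neg (fun hc => hlt hc.2), if_pos hm,
          List.getD_eq_default _ 0 (by omega), mul_zero, add_zero]
    · rw [if_neg (fun hc => hm hc.1), if_neg hm, add_zero])]
  rw [PySem.List.foldl_add]
  simp only [zero_add]
  unfold primSum
  apply sum_map_filter_of_zero
  intro d _ hq
  have hmu : mobius d = 0 := by simpa using hq
  unfold primTerm
  rw [hmu]
  split <;> simp

lemma primSum_zero (a : List (Int × List Int)) (n j : Int) (hn : 1 ≤ n)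
    (hj : degBound a n ≤ j) : primSum a n j = 0 := by
  unfold primSum
  apply List.sum_eq_zero
  intro x hx
  rw [List.mem_map] at hx
  obtain ⟨d, hd, rfl⟩ := hx
  have hd1 : 1 ≤ d := one_le_of_mem_divisors n d hn hd
  unfold primTerm
  by_cases hm : PySem.Int.mod j d = 0
  · rw [if_pos hm]
    by_cases hmu : mobius d = 0
    · rw [hmu, zero_mul]
    · have hdf : d ∈ (divisors n).filter (fun d => decide (mobius d ≠ 0)) :=
        List.mem_filter.mpr ⟨hd, by simpa using hmu⟩
      unfold degBound at hj
      rw [List.foldl_map] at hj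
      have hb := (PySem.List.le_foldl_max_int
        ((divisors n).filter (fun d => decide (mobius d ≠ 0)))
        (fun d => (((getPoly a (PySem.Int.floordiv n d)).length : Int) - 1) * d) 0).2 d hdf
      simp only [] at hb
      obtain ⟨q, hq⟩ := (PySem.Int.mod_eq_zero_iff_dvd j d).mp hm
      have hfd : PySem.Int.floordiv j d = q := by
        rw [hq, PySem.Int.floordiv_eq_ediv_of_pos (by omega),
          Int.mul_ediv_cancel_left _ (by omega)]
      have hq' : j = q * d := by rw [hq, mul_comm]
      have hLlen : (((getPoly a (PySem.Int.floordiv n d)).length : Int)) ≤ q := by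
        by_contra hcon
        rw [not_le] at hcon
        have h3 : q * d ≤ (((getPoly a (PySem.Int.floordiv n d)).length : Int) - 1) * d :=
          mul_le_mul_of_nonneg_right (by omega) (by omega)
        omega
      rw [hfd, List.getD_eq_default _ 0 (by omega), mul_zero]
  · rw [if_neg hm]

-- ---- per-level equality of the two bodies, and the claim ----
lemma body_eq (a : List (Int × List Int)) (n : Int) (hn : 1 ≤ n) :
    polyTrim
      (((divisors n).foldl
          (fun acc d =>
            let mu := mobius d
            if mu = 0 then acc
            else polyAddScaled acc (polySubUPow (getPoly a (PySem.Int.floordiv n d)) d) mu)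
          [0]).map (fun c => PySem.Int.floordiv c n))
    = polyTrim
        ((PySem.List.pyRange 0
            (1 + ((((divisors n).foldl
                (fun t d =>
                  let mu := mobius d
                  if mu ≠ 0 then t ++ [(d, mu, getPoly a (PySem.Int.floordiv n d))] else t)
                ([] : List (Int × Int × List Int))).map
                  (fun t => ((t.2.2.length : Int) - 1) * t.1)).foldl max 0)) 1).map
          (fun j =>
            let s := ((divisors n).foldl
                (fun t d =>
                  let mu := mobius d
                  if mu ≠ 0 then t ++ [(d, mu, getPoly a (PySem.Int.floordiv n d))] else t)
                ([] : List (Int × Int × List Int))).foldl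
              (fun s t =>
                if PySem.Int.mod j t.1 = 0 ∧ PySem.Int.floordiv j t.1 < (t.2.2.length : Int)
                then s + t.2.1 * PySem.List.pyGetD t.2.2 (PySem.Int.floordiv j t.1) 0
                else s)
              0
            PySem.Int.floordiv s n)) := by
  have hds1 : ∀ d ∈ divisors n, 1 ≤ d := fun d hd => one_le_of_mem_divisors n d hn hd
  obtain ⟨hne, hco⟩ := accA_spec a n (divisors n) hds1 [0] (by simp)
  rw [termsB_eq]
  rw [List.map_map]
  have hcomp : ((fun t : Int × Int × List Int => ((t.2.2.length : Int) - 1) * t.1) ∘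
      (fun d => (d, mobius d, getPoly a (PySem.Int.floordiv n d))))
      = fun d => (((getPoly a (PySem.Int.floordiv n d)).length : Int) - 1) * d := rfl
  rw [hcomp]
  have hLdeg : (1 + (((divisors n).filter (fun d => decide (mobius d ≠ 0))).map
      (fun d => (((getPoly a (PySem.Int.floordiv n d)).length : Int) - 1) * d)).foldl max 0)
      = degBound a n := rfl
  rw [hLdeg]
  have hdeg1 : 1 ≤ degBound a n := by
    unfold degBound
    rw [List.foldl_map]
    have := (PySem.List.le_foldl_max_int
      ((divisors n).filter (fun d => decide (mobius d ≠ 0)))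
      (fun d => (((getPoly a (PySem.Int.floordiv n d)).length : Int) - 1) * d) 0).1
    omega
  apply polyTrim_congr
  · intro hc
    exact hne (List.map_eq_nil_iff.mp hc)
  · apply List.ne_nil_of_length_pos
    rw [List.length_map, PySem.List.length_pyRange_one]
    omega
  · intro j
    have hmapdiv : ∀ (l : List Int),
        (l.map (fun c => PySem.Int.floordiv c n)).getD j 0
          = PySem.Int.floordiv (l.getD j 0) n := by
      intro l
      rcases Nat.lt_or_ge j l.length with h | h
      · rw [List.getD_eq_getElem _ 0 (by simpa using h), List.getElem_map,
          List.getD_eq_getElem _ 0 h]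
      · rw [List.getD_eq_default _ 0 (by simpa using h), List.getD_eq_default _ 0 h,
          floordiv_zero_left]
    rw [hmapdiv, hco j]
    have h00 : ([0] : List Int).getD j 0 = 0 := by cases j <;> rfl
    rw [h00, zero_add]
    rw [PySem.List.pyRange_one 0 (degBound a n), List.map_map]
    rcases Nat.lt_or_ge j (degBound a n - 0).toNat with hj | hj
    · rw [PySem.List.getD_map_range _ _ _ _ hj]
      simp only [Function.comp_apply, zero_add]
      rw [sumB_spec a n (j : Int) hn (by omega)]
      rfl
    · rw [List.getD_eq_default _ 0 (by rw [List.length_map, List.length_range]; omega)]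
      have hz : primSum a n (j : Int) = 0 := primSum_zero a n (j : Int) hn (by omega)
      have hz' : (List.map (fun d => primTerm a n d (j : Int)) (divisors n)).sum = 0 := hz
      rw [hz', floordiv_zero_left]

-- ===== VERDICT (by name: the statement is the Claim_ definition above) =====
theorem primitive_from_traces_polys_py_spec : Claim_equal_primitive_from_traces_polys_py := by
  intro a n_max _ _
  unfold Spec_primitive_from_traces_polys_py
  unfold primitive_from_traces_polys_py primitive_from_traces_polys_py_alt
  refine congrArg PySem.Dict.items ?_
  refine PySem.List.foldl_congr_mem _ _ _ _ ?_
  intro B n hn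
  have hn1 : 1 ≤ n := (PySem.List.mem_pyRange_one.mp hn).1
  simp only []
  rw [body_eq a n hn1]
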